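-- pv_equiv track=rewrite | github.com/aferaudo/mills-game | src/game_utils.py | check_tris
-- ===== SOURCE A (Python) =====
-- def all_tris():
--     """
--     restituisce una lista contenente tutti i possibili tris che si possono formare sulla board
--     :return:
--     """
--     return [
--         [0, 1, 2],
--         [0, 9, 21],
--         [2, 14, 23],
--         [21, 22, 23],
--         [3, 4, 5],
--         [3, 10, 18],
--         [5, 13, 20],
--         [18, 19, 20],
--         [6, 7, 8],
--         [6, 11, 15],
--         [8, 12, 17],
--         [15, 16, 17],
--         [1, 4, 7],
--         [9, 10, 11],
--         [12, 13, 14],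
--         [16, 19, 22]
--     ]
--
-- def check_tris(board, old_pos, pos_fin, player):
--     """
--     Controlla se con la mossa da effettuare si realizza un tris
--     :param board:
--     :param old_pos:
--     :param pos_fin:
--     :param player:
--     :return: boolean
--     """
--     for tris in all_tris():
--         if pos_fin in tris:
--             count = 0
--             for pos in tris:
--                 if pos != pos_fin and board[pos] == player and old_pos != pos:
--                     count += 1
--                 if count == 2:
--                     return True
--
--     return False
-- ===== SOURCE B (Python) =====
-- def all_tris():
--     return [
--         [0, 1, 2],
--         [0, 9, 21],
--         [2, 14, 23],
--         [21, 22, 23],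
--         [3, 4, 5],
--         [3, 10, 18],
--         [5, 13, 20],
--         [18, 19, 20],
--         [6, 7, 8],
--         [6, 11, 15],
--         [8, 12, 17],
--         [15, 16, 17],
--         [1, 4, 7],
--         [9, 10, 11],
--         [12, 13, 14],
--         [16, 19, 22]
--     ]
--
-- def _build_index():
--     idx = {}
--     for tri in all_tris():
--         for p in tri:
--             a, b = [x for x in tri if x != p]
--             idx.setdefault(p, []).append((a, b))
--     return idx
--
-- _IDX = _build_index()
--
-- def check_tris(board, old_pos, pos_fin, player):
--     return any(board[a] == player and board[b] == player
--                and a != old_pos and b != old_pos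
--                for a, b in _IDX.get(pos_fin, ()))
-- ===== Notes on version B (the rewrite author's own statement) =====
-- stated objective: idiomatic
-- what changed: B precomputes once a dict mapping each board position to the (other two cells) of every triple containing it, and check_tris becomes a single any() over that lookup with a direct two-cell test, replacing A's scan of all 16 triples with a membership test and a running counter with early return.
-- outside the precondition, e.g. on check_tris([1, 1, 1], 5, 0, 1): A returns True, B returns True
import Mathlib
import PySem

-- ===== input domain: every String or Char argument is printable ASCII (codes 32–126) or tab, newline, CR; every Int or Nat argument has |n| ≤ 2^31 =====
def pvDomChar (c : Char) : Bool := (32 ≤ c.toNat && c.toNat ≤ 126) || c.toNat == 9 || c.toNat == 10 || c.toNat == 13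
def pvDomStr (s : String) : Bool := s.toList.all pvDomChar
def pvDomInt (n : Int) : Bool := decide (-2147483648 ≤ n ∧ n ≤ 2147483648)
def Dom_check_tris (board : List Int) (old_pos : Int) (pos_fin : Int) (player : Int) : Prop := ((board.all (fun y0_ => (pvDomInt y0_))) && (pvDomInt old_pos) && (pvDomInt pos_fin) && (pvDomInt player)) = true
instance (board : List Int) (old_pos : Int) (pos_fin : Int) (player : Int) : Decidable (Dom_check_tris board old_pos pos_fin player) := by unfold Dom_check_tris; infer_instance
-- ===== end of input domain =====

-- B replaces A's scan over all 16 triples with a precomputed position→(other two cells) index and a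
-- direct two-cell check instead of A's running counter (objective: idiomatic; return value only).

-- ===== PORT A =====
def pvAllTris : List (List Int) :=
  [[0, 1, 2], [0, 9, 21], [2, 14, 23], [21, 22, 23],
   [3, 4, 5], [3, 10, 18], [5, 13, 20], [18, 19, 20],
   [6, 7, 8], [6, 11, 15], [8, 12, 17], [15, 16, 17],
   [1, 4, 7], [9, 10, 11], [12, 13, 14], [16, 19, 22]]

-- inner 'for pos in tris' loop with the running count and the early 'return True'
def pvInnerA (board : List Int) (old_pos : Int) (pos_fin : Int) (player : Int) :
    List Int → Int → Bool
  | [], _ => false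
  | p :: rest, count =>
    let count' := if p ≠ pos_fin ∧ PySem.List.pyGetD board p 0 = player ∧ old_pos ≠ p
                  then count + 1 else count
    if count' = 2 then true else pvInnerA board old_pos pos_fin player rest count'

-- outer 'for tris in all_tris()' loop
def pvOuterA (board : List Int) (old_pos : Int) (pos_fin : Int) (player : Int) :
    List (List Int) → Bool
  | [] => false
  | t :: rest =>
    if t.contains pos_fin then
      (if pvInnerA board old_pos pos_fin player t 0 then true
       else pvOuterA board old_pos pos_fin player rest)
    else pvOuterA board old_pos pos_fin player rest

def check_tris (board : List Int) (old_pos : Int) (pos_fin : Int) (player : Int) : Bool :=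
  pvOuterA board old_pos pos_fin player pvAllTris

-- ===== PORT B =====
def pvTrisB : List (List Int) :=
  [[0, 1, 2], [0, 9, 21], [2, 14, 23], [21, 22, 23],
   [3, 4, 5], [3, 10, 18], [5, 13, 20], [18, 19, 20],
   [6, 7, 8], [6, 11, 15], [8, 12, 17], [15, 16, 17],
   [1, 4, 7], [9, 10, 11], [12, 13, 14], [16, 19, 22]]

-- _build_index(): position → list of (other two cells of each triple containing it)
def pvIdx : PySem.Dict Int (List (Int × Int)) :=
  pvTrisB.foldl
    (fun d tri =>
      tri.foldl
        (fun d p =>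
          let rest := tri.filter (fun x => x ≠ p)
          d.insert p ((d.getD p []) ++ [(rest.getD 0 0, rest.getD 1 0)]))
        d)
    PySem.Dict.empty

def check_tris_alt (board : List Int) (old_pos : Int) (pos_fin : Int) (player : Int) : Bool :=
  (pvIdx.getD pos_fin []).any
    (fun pr =>
      PySem.List.pyGetD board pr.1 0 == player && PySem.List.pyGetD board pr.2 0 == player &&
      pr.1 != old_pos && pr.2 != old_pos)

-- ===== PRECONDITION & SPEC =====
-- Pre_ excludes the inputs on which A raises IndexError (board shorter than the board positions it
-- reads for a pos_fin that occurs in some triple); as a simple closed form it also excludes a few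
-- short-board inputs on which A happens to return before reaching an out-of-range index (see cites).
def Pre_check_tris (board : List Int) (old_pos : Int) (pos_fin : Int) (player : Int) : Prop :=
  24 ≤ board.length ∨ pos_fin < 0 ∨ 23 < pos_fin
instance (board : List Int) (old_pos : Int) (pos_fin : Int) (player : Int) : Decidable (Pre_check_tris board old_pos pos_fin player) := by unfold Pre_check_tris; infer_instance

def pvWitness_check_tris : List Int × Int × Int × Int :=
  ([1, 1, 0, 0, 2, 2, 0, 0, 1, 1, 0, 0, 2, 2, 0, 0, 1, 1, 0, 0, 2, 2, 0, 0], 3, 0, 1)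

def Spec_check_tris (board : List Int) (old_pos : Int) (pos_fin : Int) (player : Int) (out : Bool) : Prop := out = check_tris_alt board old_pos pos_fin player
instance (board : List Int) (old_pos : Int) (pos_fin : Int) (player : Int) (out : Bool) : Decidable (Spec_check_tris board old_pos pos_fin player out) := by unfold Spec_check_tris; infer_instance

-- ===== CLAIM (what is proved, stated in full; the proofs are below) =====
def Claim_equal_check_tris : Prop := ∀ (board : List Int) (old_pos : Int) (pos_fin : Int) (player : Int), Dom_check_tris board old_pos pos_fin player → Pre_check_tris board old_pos pos_fin player → Spec_check_tris board old_pos pos_fin player (check_tris board old_pos pos_fin player)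

-- ===== LEMMAS AND PROOFS =====

theorem pvOuterA_nomem (board : List Int) (old_pos pos_fin player : Int) :
    ∀ ts : List (List Int), (∀ t ∈ ts, t.contains pos_fin = false) →
      pvOuterA board old_pos pos_fin player ts = false := by
  intro ts h
  induction ts with
  | nil => rfl
  | cons t rest ih =>
    rw [pvOuterA, h t (by simp)]
    exact ih (fun t' ht' => h t' (by simp [ht']))

set_option maxRecDepth 10000 in
theorem pvIdx_lit : pvIdx = PySem.Dict.mk
  [(0, [(1, 2), (9, 21)]), (1, [(0, 2), (4, 7)]), (2, [(0, 1), (14, 23)]),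
   (9, [(0, 21), (10, 11)]), (21, [(0, 9), (22, 23)]), (14, [(2, 23), (12, 13)]),
   (23, [(2, 14), (21, 22)]), (22, [(21, 23), (16, 19)]), (3, [(4, 5), (10, 18)]),
   (4, [(3, 5), (1, 7)]), (5, [(3, 4), (13, 20)]), (10, [(3, 18), (9, 11)]),
   (18, [(3, 10), (19, 20)]), (13, [(5, 20), (12, 14)]), (20, [(5, 13), (18, 19)]),
   (19, [(18, 20), (16, 22)]), (6, [(7, 8), (11, 15)]), (7, [(6, 8), (1, 4)]),
   (8, [(6, 7), (12, 17)]), (11, [(6, 15), (9, 10)]), (15, [(6, 11), (16, 17)]),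
   (12, [(8, 17), (13, 14)]), (17, [(8, 12), (15, 16)]), (16, [(15, 17), (19, 22)])] := by
  decide

set_option maxRecDepth 10000 in

set_option maxRecDepth 10000 in
set_option maxHeartbeats 4000000 in
theorem check_tris_main (board : List Int) (old_pos pos_fin player : Int)
    (h : Pre_check_tris board old_pos pos_fin player) :
    check_tris board old_pos pos_fin player = check_tris_alt board old_pos pos_fin player := by
  by_cases hr : 0 ≤ pos_fin ∧ pos_fin ≤ 23
  · obtain ⟨h1, h2⟩ := hr
    rw [check_tris_alt, pvIdx_lit]
    interval_cases pos_fin <;>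
      (simp [check_tris, pvOuterA, pvInnerA, pvAllTris,
             PySem.Dict.getD, PySem.Dict.get?_mk_cons] <;>
       split_ifs <;> simp_all <;> omega)
  · have hor : pos_fin < 0 ∨ 23 < pos_fin := by omega
    rw [check_tris, pvOuterA_nomem board old_pos pos_fin player pvAllTris
        (by intro t ht; fin_cases ht <;> simp <;> omega)]
    have hc : pvIdx.contains pos_fin = false := by
      rw [pvIdx_lit]; simp; omega
    rw [check_tris_alt, PySem.Dict.getD_of_not_contains _ _ hc]
    rfl

-- ===== VERDICT (by name: the statement is the Claim_ definition above) =====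
theorem check_tris_spec : Claim_equal_check_tris := by
  intro board old_pos pos_fin player _ hpre
  exact check_tris_main board old_pos pos_fin player hpre
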